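-- pv_equiv track=rewrite | github.com/sunhuaiyu/rosalind | rosalind_ba11b.py | spectrum2edges
-- ===== SOURCE A (Python) =====
-- mass_aa = {71: 'A', 103: 'C', 129: 'E', 115: 'D', 57: 'G', 147: 'F',
--  113: 'I', 137: 'H', 128: 'K', 131: 'M', 114: 'N', 97: 'P', 87: 'S',
--  156: 'R', 101: 'T', 186: 'W', 99: 'V', 163: 'Y', 4: 'X', 5: 'Z'}
--
-- def spectrum2edges(spec):
--     '''spec is a sorted list'''
--     n = len(spec)
--     edges = []
--     for i in range(n-1):
--         for j in range(i+1, n):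
--             d = spec[j] - spec[i]
--             if (spec[j] - spec[i]) in mass_aa.keys():
--                 edges.append((i, j, mass_aa[d]))
--     return edges
-- ===== SOURCE B (Python) =====
-- mass_aa = {71: 'A', 103: 'C', 129: 'E', 115: 'D', 57: 'G', 147: 'F',
--  113: 'I', 137: 'H', 128: 'K', 131: 'M', 114: 'N', 97: 'P', 87: 'S',
--  156: 'R', 101: 'T', 186: 'W', 99: 'V', 163: 'Y', 4: 'X', 5: 'Z'}
--
-- def spectrum2edges(spec):
--     # value -> ascending list of indices holding that value
--     pos = {}
--     for j, v in enumerate(spec):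
--         pos[v] = pos.get(v, []) + [j]
--     edges = []
--     for i, v in enumerate(spec):
--         cands = []
--         for m, aa in mass_aa.items():
--             for j in pos.get(v + m, []):
--                 if j > i:
--                     cands.append((j, aa))
--         cands.sort(key=lambda t: t[0])
--         for j, aa in cands:
--             edges.append((i, j, aa))
--     return edges
-- ===== Notes on version B (the rewrite author's own statement) =====
-- stated objective: faster
-- what changed: Replaces the quadratic all-pairs scan by a value-to-indices dictionary built in one pass: for each i only the 20 possible target masses are looked up and the few hits are merged in index order, instead of comparing spec[i] against every later element.
import Mathlib
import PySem

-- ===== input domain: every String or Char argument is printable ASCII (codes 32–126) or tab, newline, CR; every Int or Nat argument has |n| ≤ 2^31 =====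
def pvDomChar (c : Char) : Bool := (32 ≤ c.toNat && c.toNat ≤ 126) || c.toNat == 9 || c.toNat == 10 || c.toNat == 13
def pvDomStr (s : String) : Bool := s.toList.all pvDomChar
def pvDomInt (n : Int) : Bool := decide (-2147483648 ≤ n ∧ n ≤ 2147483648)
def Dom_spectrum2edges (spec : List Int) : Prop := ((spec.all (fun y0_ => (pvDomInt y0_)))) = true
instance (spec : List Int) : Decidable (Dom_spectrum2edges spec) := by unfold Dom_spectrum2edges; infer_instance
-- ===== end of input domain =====

-- B replaces A's quadratic all-pairs scan by a value→indices dictionary: per position only the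
-- 20 candidate masses are looked up and the hits merged in index order (objective: faster).

-- the module-level constant mass_aa, shared by both ports
def massAA : PySem.Dict Int String := PySem.Dict.ofList
  [(71, "A"), (103, "C"), (129, "E"), (115, "D"), (57, "G"), (147, "F"),
   (113, "I"), (137, "H"), (128, "K"), (131, "M"), (114, "N"), (97, "P"), (87, "S"),
   (156, "R"), (101, "T"), (186, "W"), (99, "V"), (163, "Y"), (4, "X"), (5, "Z")]

-- ===== PORT A =====
def spectrum2edges (spec : List Int) : List (Int × Int × String) :=
  let n : Int := PySem.List.len spec
  (PySem.List.pyRange 0 (n - 1) 1).foldl (fun edges i =>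
    (PySem.List.pyRange (i + 1) n 1).foldl (fun edges j =>
      let d := PySem.List.pyGetD spec j 0 - PySem.List.pyGetD spec i 0
      if massAA.contains (PySem.List.pyGetD spec j 0 - PySem.List.pyGetD spec i 0) then
        edges ++ [(i, j, massAA.getD d "")]
      else edges) edges) []

-- ===== PORT B =====
def spectrum2edges_alt (spec : List Int) : List (Int × Int × String) :=
  let pos : PySem.Dict Int (List Int) :=
    (PySem.List.enumerate spec).foldl
      (fun d jv => d.modify jv.2 [] (fun l => l ++ [jv.1])) PySem.Dict.empty
  (PySem.List.enumerate spec).foldl (fun edges iv =>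
    let cands : List (Int × String) :=
      massAA.items.foldl (fun cs ma =>
        (pos.getD (iv.2 + ma.1) []).foldl (fun cs j =>
          if j > iv.1 then cs ++ [(j, ma.2)] else cs) cs) []
    let scands := PySem.List.sorted cands (fun t => t.1)
    scands.foldl (fun edges p => edges ++ [(iv.1, p.1, p.2)]) edges) []

-- ===== PRECONDITION & SPEC =====
def Spec_spectrum2edges (spec : List Int) (out : List (Int × Int × String)) : Prop := out = spectrum2edges_alt spec
instance (spec : List Int) (out : List (Int × Int × String)) : Decidable (Spec_spectrum2edges spec out) := by unfold Spec_spectrum2edges; infer_instance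

-- ===== CLAIM (what is proved, stated in full; the proofs are below) =====
def Claim_equal_spectrum2edges : Prop := ∀ (spec : List Int), Dom_spectrum2edges spec → Spec_spectrum2edges spec (spectrum2edges spec)

-- ===== LEMMAS AND PROOFS =====

-- A's per-i inner loop, in filterMap normal form
def pvE (spec : List Int) (i : Int) : List (Int × Int × String) :=
  (PySem.List.pyRange (i + 1) (PySem.List.len spec) 1).filterMap
    (fun j => (massAA.get? (PySem.List.pyGetD spec j 0 - PySem.List.pyGetD spec i 0)).map
      (fun aa => (i, j, aa)))

-- B's per-i candidate list, in filterMap normal form (sorted ascending by index)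
def pvTarget (spec : List Int) (i v : Int) : List (Int × String) :=
  (PySem.List.pyRange (i + 1) (PySem.List.len spec) 1).filterMap
    (fun j => (massAA.get? (PySem.List.pyGetD spec j 0 - v)).map (fun aa => (j, aa)))

lemma massAA_keys_nodup : massAA.keys.Nodup := by decide

-- filter-by-membership + defaulted lookup = filterMap of the lookup
lemma pvFilter_isSome_map {β γ δ : Type} (f : β → Option γ) (g : β → γ → δ) (b : γ) (l : List β) :
    (l.filter (fun x => (f x).isSome)).map (fun x => g x ((f x).getD b)) =
      l.filterMap (fun x => (f x).map (g x)) := by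
  induction l with
  | nil => rfl
  | cons x l ih =>
    cases h : f x <;> simp [h, ih]

-- adding one element x whose key matches entry (k x, aa) of a nodup-key association list
-- inserts (x, aa) somewhere in the grouped flatMap: a permutation-with-cons
lemma pvGroups_cons_some {κ γ β : Type} [BEq κ] [LawfulBEq κ]
    (its : List (κ × γ)) (hnd : (its.map Prod.fst).Nodup)
    (k : β → κ) (x : β) (R : List β) (aa : γ) (hmem : (k x, aa) ∈ its) :
    (its.flatMap (fun p => ((x :: R).filter (fun y => k y == p.1)).map (fun y => (y, p.2)))).Perm
      ((x, aa) :: its.flatMap (fun p => ((R.filter (fun y => k y == p.1)).map (fun y => (y, p.2))))) := by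
  induction its with
  | nil => simp at hmem
  | cons p its ih =>
    simp only [List.map_cons, List.nodup_cons] at hnd
    rcases List.mem_cons.mp hmem with h | h
    · -- head entry is (k x, aa): its group gains (x, aa) at its front, the rest is unchanged
      subst h
      have hrest : its.flatMap (fun p => ((x :: R).filter (fun y => k y == p.1)).map (fun y => (y, p.2))) =
          its.flatMap (fun p => ((R.filter (fun y => k y == p.1)).map (fun y => (y, p.2)))) := by
        rw [List.flatMap, List.flatMap]
        congr 1
        apply List.map_congr_left
        intro q hq
        have hne : q.1 ≠ k x := by
          intro he; exact hnd.1 (by simpa [he] using List.mem_map_of_mem (f := Prod.fst) hq)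
        simp [Ne.symm hne]
      have hhead : (x :: R).filter (fun y => k y == (k x : κ)) = x :: R.filter (fun y => k y == k x) := by
        simp
      rw [List.flatMap_cons, List.flatMap_cons, hrest]
      simp only [hhead, List.map_cons, List.cons_append]
      exact List.Perm.refl _
    · -- head entry has a different key: recurse and commute past its group
      have hne : p.1 ≠ k x := by
        intro he
        exact hnd.1 (by simpa [← he] using List.mem_map_of_mem (f := Prod.fst) h)
      have hfilter : (x :: R).filter (fun y => k y == p.1) = R.filter (fun y => k y == p.1) := by
        simp [Ne.symm hne]
      simp only [List.flatMap_cons, hfilter]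
      exact ((ih hnd.2 h).append_left _).trans List.perm_middle

-- grouped flatMap over a nodup-key dict is a permutation of the direct filterMap scan
lemma pvGroups_perm {κ γ β : Type} [BEq κ] [LawfulBEq κ]
    (d : PySem.Dict κ γ) (hnd : d.keys.Nodup) (k : β → κ) (R : List β) :
    (d.items.flatMap (fun p => ((R.filter (fun y => k y == p.1)).map (fun y => (y, p.2))))).Perm
      (R.filterMap (fun x => (d.get? (k x)).map (fun aa => (x, aa)))) := by
  have hnd' : (d.items.map Prod.fst).Nodup := by simpa [PySem.Dict.keys] using hnd
  induction R with
  | nil => simp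
  | cons x R ih =>
    rw [List.filterMap_cons]
    cases h : d.get? (k x) with
    | some aa =>
      have hmem := PySem.Dict.mem_items_of_get?_eq_some d h
      simp only [Option.map_some]
      exact (pvGroups_cons_some d.items hnd' k x R aa hmem).trans (ih.cons _)
    | none =>
      have hnotin : k x ∉ d.items.map Prod.fst := by
        simpa [PySem.Dict.keys] using (PySem.Dict.get?_eq_none_iff_not_mem_keys d (k x)).mp h
      have heq : d.items.flatMap (fun p => ((x :: R).filter (fun y => k y == p.1)).map (fun y => (y, p.2))) =
          d.items.flatMap (fun p => ((R.filter (fun y => k y == p.1)).map (fun y => (y, p.2)))) := by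
        rw [List.flatMap, List.flatMap]
        congr 1
        apply List.map_congr_left
        intro q hq
        have hne : k x ≠ q.1 := fun he => hnotin (he ▸ List.mem_map_of_mem (f := Prod.fst) hq)
        simp [hne]
      rw [heq, Option.map_none]
      exact ih

-- B's value→indices dictionary, named for the proofs
def pvPos (spec : List Int) : PySem.Dict Int (List Int) :=
  (PySem.List.enumerate spec).foldl
    (fun d jv => d.modify jv.2 [] (fun l => l ++ [jv.1])) PySem.Dict.empty

lemma pvPos_getD (spec : List Int) (c : Int) :
    (pvPos spec).getD c [] =
      (PySem.List.pyRange 0 (PySem.List.len spec) 1).filter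
        (fun j => PySem.List.pyGetD spec j 0 == c) := by
  unfold pvPos
  rw [show (PySem.List.enumerate spec).foldl
        (fun d jv => d.modify jv.2 [] (fun l => l ++ [jv.1])) PySem.Dict.empty
      = ((PySem.List.enumerate spec).map (fun jv => (jv.2, jv.1))).foldl
        (fun d p => d.modify p.1 [] (fun l => l ++ [p.2])) PySem.Dict.empty from
      by rw [List.foldl_map]]
  rw [PySem.Dict.getD_foldl_modify_append]
  rw [PySem.List.enumerate_eq_map_pyRange spec 0]
  simp [List.filter_map, List.map_map, Function.comp_def]

lemma pvFilterRange (spec : List Int) (i v m : Int) (h0 : 0 ≤ i) (h1 : i < PySem.List.len spec) :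
    (((PySem.List.pyRange 0 (PySem.List.len spec) 1).filter
        (fun j => PySem.List.pyGetD spec j 0 == v + m)).filter (fun j => decide (j > i))) =
      (PySem.List.pyRange (i + 1) (PySem.List.len spec) 1).filter
        (fun j => PySem.List.pyGetD spec j 0 - v == m) := by
  rw [List.filter_filter]
  rw [PySem.List.pyRange_one_append 0 (i + 1) (PySem.List.len spec) (by omega) (by omega)]
  rw [List.filter_append]
  have h2 : (PySem.List.pyRange 0 (i + 1) 1).filter
      (fun j => decide (j > i) && (PySem.List.pyGetD spec j 0 == v + m)) = [] := by
    apply List.filter_eq_nil_iff.mpr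
    intro j hj
    have := (PySem.List.mem_pyRange_one).mp hj
    simp only [Bool.and_eq_true, decide_eq_true_eq]
    omega
  rw [h2, List.nil_append]
  apply List.filter_congr
  intro j hj
  have hm := (PySem.List.mem_pyRange_one).mp hj
  have hgt : decide (j > i) = true := by simp only [decide_eq_true_eq]; omega
  rw [hgt, Bool.true_and]
  by_cases h : PySem.List.pyGetD spec j 0 = v + m
  · have h' : PySem.List.pyGetD spec j 0 - v = m := by omega
    rw [beq_iff_eq.mpr h, beq_iff_eq.mpr h']
  · rw [beq_eq_false_iff_ne.mpr h, beq_eq_false_iff_ne.mpr (by omega)]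

-- B's per-position block: candidates gathered per mass, sorted by index, equal the direct scan
lemma pvB_block (spec : List Int) (i v : Int) (h0 : 0 ≤ i) (h1 : i < PySem.List.len spec) :
    PySem.List.sorted
      (massAA.items.foldl (fun cs ma =>
        ((pvPos spec).getD (v + ma.1) []).foldl (fun cs j =>
          if j > i then cs ++ [(j, ma.2)] else cs) cs) [])
      (fun t => t.1) = pvTarget spec i v := by
  have hinner : ∀ (cs : List (Int × String)) (ma : Int × String),
      ((pvPos spec).getD (v + ma.1) []).foldl (fun cs j =>
        if j > i then cs ++ [(j, ma.2)] else cs) cs =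
      cs ++ ((PySem.List.pyRange (i + 1) (PySem.List.len spec) 1).filter
        (fun j => PySem.List.pyGetD spec j 0 - v == ma.1)).map (fun j => (j, ma.2)) := by
    intro cs ma
    rw [PySem.List.foldl_append_ite (fun j => j > i) (fun j => (j, ma.2))]
    rw [pvPos_getD, pvFilterRange spec i v ma.1 h0 h1]
  have hcands : massAA.items.foldl (fun cs ma =>
      ((pvPos spec).getD (v + ma.1) []).foldl (fun cs j =>
        if j > i then cs ++ [(j, ma.2)] else cs) cs) [] =
      massAA.items.flatMap (fun ma =>
        ((PySem.List.pyRange (i + 1) (PySem.List.len spec) 1).filter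
          (fun j => PySem.List.pyGetD spec j 0 - v == ma.1)).map (fun j => (j, ma.2))) := by
    rw [show (fun cs (ma : Int × String) =>
          ((pvPos spec).getD (v + ma.1) []).foldl (fun cs j =>
            if j > i then cs ++ [(j, ma.2)] else cs) cs) =
        (fun cs ma => cs ++ ((PySem.List.pyRange (i + 1) (PySem.List.len spec) 1).filter
          (fun j => PySem.List.pyGetD spec j 0 - v == ma.1)).map (fun j => (j, ma.2))) from
      funext fun cs => funext fun ma => hinner cs ma]
    rw [PySem.List.foldl_append_eq_flatMap]
    rfl
  rw [hcands]
  apply PySem.List.sorted_eq_of_perm_of_pairwise_lt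
  · exact (pvGroups_perm massAA massAA_keys_nodup
      (fun j => PySem.List.pyGetD spec j 0 - v)
      (PySem.List.pyRange (i + 1) (PySem.List.len spec) 1)).symm
  · unfold pvTarget
    rw [List.pairwise_filterMap]
    apply List.Pairwise.imp _ (PySem.List.pairwise_lt_pyRange_one (a := i + 1) (b := PySem.List.len spec))
    intro a a' hlt b hb b' hb'
    rcases Option.map_eq_some_iff.mp hb with ⟨aa, _, rfl⟩
    rcases Option.map_eq_some_iff.mp hb' with ⟨aa', _, rfl⟩
    exact hlt

-- A in flatMap normal form
lemma pvA_eq (spec : List Int) :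
    spectrum2edges spec =
      (PySem.List.pyRange 0 (PySem.List.len spec - 1) 1).flatMap (pvE spec) := by
  have hEi : ∀ i : Int,
      ((PySem.List.pyRange (i + 1) (PySem.List.len spec) 1).filter
        (fun j => massAA.contains (PySem.List.pyGetD spec j 0 - PySem.List.pyGetD spec i 0))).map
        (fun j => (i, j, massAA.getD (PySem.List.pyGetD spec j 0 - PySem.List.pyGetD spec i 0) "")) =
      pvE spec i := by
    intro i
    unfold pvE
    rw [← pvFilter_isSome_map
      (fun j => massAA.get? (PySem.List.pyGetD spec j 0 - PySem.List.pyGetD spec i 0))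
      (fun j aa => ((i : Int), (j : Int), aa)) ""]
    rw [show (PySem.List.pyRange (i + 1) (PySem.List.len spec) 1).filter
          (fun j => massAA.contains (PySem.List.pyGetD spec j 0 - PySem.List.pyGetD spec i 0)) =
        (PySem.List.pyRange (i + 1) (PySem.List.len spec) 1).filter
          (fun j => (massAA.get? (PySem.List.pyGetD spec j 0 - PySem.List.pyGetD spec i 0)).isSome) from
      List.filter_congr fun j _ => by rw [PySem.Dict.contains_eq_isSome_get?]]
    apply List.map_congr_left
    intro j _
    rw [PySem.Dict.getD_eq_get?_getD]
  show (PySem.List.pyRange 0 (PySem.List.len spec - 1) 1).foldl (fun edges i =>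
      (PySem.List.pyRange (i + 1) (PySem.List.len spec) 1).foldl (fun edges j =>
        if massAA.contains (PySem.List.pyGetD spec j 0 - PySem.List.pyGetD spec i 0) then
          edges ++ [(i, j, massAA.getD (PySem.List.pyGetD spec j 0 - PySem.List.pyGetD spec i 0) "")]
        else edges) edges) [] = _
  rw [show (fun (edges : List (Int × Int × String)) (i : Int) =>
        (PySem.List.pyRange (i + 1) (PySem.List.len spec) 1).foldl (fun edges j =>
          if massAA.contains (PySem.List.pyGetD spec j 0 - PySem.List.pyGetD spec i 0) then
            edges ++ [(i, j, massAA.getD (PySem.List.pyGetD spec j 0 - PySem.List.pyGetD spec i 0) "")]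
          else edges) edges) =
      (fun edges i => edges ++ pvE spec i) from
    funext fun edges => funext fun i => by
      rw [PySem.List.foldl_append_if
        (fun j => massAA.contains (PySem.List.pyGetD spec j 0 - PySem.List.pyGetD spec i 0))
        (fun j => ((i : Int), (j : Int), massAA.getD (PySem.List.pyGetD spec j 0 - PySem.List.pyGetD spec i 0) ""))]
      rw [hEi i]]
  rw [PySem.List.foldl_append_eq_flatMap, List.nil_append]

-- B in flatMap normal form
lemma pvB_eq (spec : List Int) :
    spectrum2edges_alt spec =
      (PySem.List.enumerate spec).flatMap (fun iv =>
        (PySem.List.sorted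
          (massAA.items.foldl (fun cs ma =>
            ((pvPos spec).getD (iv.2 + ma.1) []).foldl (fun cs j =>
              if j > iv.1 then cs ++ [(j, ma.2)] else cs) cs) [])
          (fun t => t.1)).map (fun p => (iv.1, p.1, p.2))) := by
  unfold spectrum2edges_alt
  show (PySem.List.enumerate spec).foldl (fun edges iv =>
      (PySem.List.sorted
        (massAA.items.foldl (fun cs ma =>
          ((pvPos spec).getD (iv.2 + ma.1) []).foldl (fun cs j =>
            if j > iv.1 then cs ++ [(j, ma.2)] else cs) cs) [])
        (fun t => t.1)).foldl (fun edges p => edges ++ [(iv.1, p.1, p.2)]) edges) [] = _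
  rw [show (fun (edges : List (Int × Int × String)) (iv : Int × Int) =>
        (PySem.List.sorted
          (massAA.items.foldl (fun cs ma =>
            ((pvPos spec).getD (iv.2 + ma.1) []).foldl (fun cs j =>
              if j > iv.1 then cs ++ [(j, ma.2)] else cs) cs) [])
          (fun t => t.1)).foldl (fun edges p => edges ++ [(iv.1, p.1, p.2)]) edges) =
      (fun edges iv =>
        edges ++ (PySem.List.sorted
          (massAA.items.foldl (fun cs ma =>
            ((pvPos spec).getD (iv.2 + ma.1) []).foldl (fun cs j =>
              if j > iv.1 then cs ++ [(j, ma.2)] else cs) cs) [])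
          (fun t => t.1)).map (fun p => (iv.1, p.1, p.2))) from
    funext fun edges => funext fun iv =>
      PySem.List.foldl_append_singleton_eq_map (fun (p : Int × String) => (iv.1, p.1, p.2)) _ edges]
  rw [PySem.List.foldl_append_eq_flatMap]
  rfl

-- (pvTarget with the pair index prepended) is A's per-i list
lemma pvTarget_map (spec : List Int) (i v : Int) :
    (pvTarget spec i v).map (fun p => ((i : Int), p.1, p.2)) =
      (PySem.List.pyRange (i + 1) (PySem.List.len spec) 1).filterMap
        (fun j => (massAA.get? (PySem.List.pyGetD spec j 0 - v)).map (fun aa => (i, j, aa))) := by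
  unfold pvTarget
  rw [List.map_filterMap]
  apply List.filterMap_congr
  intro j _
  rw [Option.map_map]
  rfl

lemma pvA_range (spec : List Int) :
    (PySem.List.pyRange 0 (PySem.List.len spec - 1) 1).flatMap (pvE spec) =
      (PySem.List.pyRange 0 (PySem.List.len spec) 1).flatMap (pvE spec) := by
  rcases (by omega : PySem.List.len spec ≤ 0 ∨ 0 < PySem.List.len spec) with h | h
  · rw [PySem.List.pyRange_one_eq_nil (by omega), PySem.List.pyRange_one_eq_nil (by omega)]
  · have hn : PySem.List.len spec = (PySem.List.len spec - 1) + 1 := by omega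
    conv_rhs => rw [hn]
    rw [PySem.List.pyRange_one_succ_right (by omega)]
    rw [List.flatMap_append]
    have hnil : pvE spec (PySem.List.len spec - 1) = [] := by
      unfold pvE
      rw [show PySem.List.len spec - 1 + 1 = PySem.List.len spec by ring]
      rw [PySem.List.pyRange_one_eq_nil (by omega)]
      rfl
    simp only [List.flatMap_cons, List.flatMap_nil, hnil, List.append_nil]

theorem spectrum2edges_spec : Claim_equal_spectrum2edges := by
  intro spec _
  unfold Spec_spectrum2edges
  rw [pvA_eq, pvB_eq, pvA_range]
  rw [PySem.List.enumerate_eq_map_pyRange spec 0]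
  rw [List.flatMap_map]
  rw [List.flatMap, List.flatMap]
  congr 1
  apply List.map_congr_left
  intro i hi
  have hm := (PySem.List.mem_pyRange_one).mp hi
  show pvE spec i = (PySem.List.sorted
      (massAA.items.foldl (fun cs ma =>
        ((pvPos spec).getD (PySem.List.pyGetD spec i 0 + ma.1) []).foldl (fun cs j =>
          if j > i then cs ++ [(j, ma.2)] else cs) cs) [])
      (fun t => t.1)).map (fun p => (i, p.1, p.2))
  rw [pvB_block spec i (PySem.List.pyGetD spec i 0) (by omega) (by omega)]
  rw [pvTarget_map]
  rfl
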